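-- pv_equiv track=rewrite | github.com/Fabio-A-Sa/Y1S1-ProgramingFundamentals | RE/RE 12 - Solving problems/4 - Moving ball.py | move_ball
-- ===== SOURCE A (Python) =====
-- def partida(board):
--
--     cardinal = ["N", "S", "E", "O"]
--
--     # Search in matriz
--     for x, y in enumerate(board):
--         for z, c in enumerate(y):
--             if c in cardinal:
--
--                 ponto = (x, z)
--                 sentido_inicial = c
--
--                 return ponto, sentido_inicial
--
-- def new_direction(coordinate, objecto):
--
--     if objecto == "\\" and (coordinate == "E" or coordinate == "S"):
--         c = ["E", "S"]
--         return c[c.index(coordinate)-1]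
--
--     if objecto == "\\" and (coordinate == "O" or coordinate == "N"):
--         c = ["O", "N"]
--         return c[c.index(coordinate)-1]
--
--     if objecto == "/" and (coordinate == "E" or coordinate == "N"):
--         c = ["E", "N"]
--         return c[c.index(coordinate)-1]
--
--     if objecto == "/" and (coordinate == "O" or coordinate == "S"):
--         c = ["O", "S"]
--         return c[c.index(coordinate)-1]
--
--     return coordinate
--
-- def move_ball(board):
--
--     coordinates = []
--
--     directions = {
--         "N" : (0, -1),
--         "S" : (0, +1),
--         "E" : (+1, 0),
--         "O" : (-1, 0),
--     }
--
--     begin = partida(board)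
--     final = "X"
--     coordinates.append(begin[0])
--
--     x = begin[0][0]
--     y = begin[0][1]
--     rumo = begin[1]
--
--     while final not in board[x][y]:
--
--         sentido = directions[rumo]
--         x = x + sentido[1]
--         y = y + sentido[0]
--         coordinates.append((x, y))
--         rumo = new_direction(rumo, board[x][y])
--
--     return coordinates
-- ===== SOURCE B (Python) =====
-- def move_ball(board):
--     # Bounce-to-bounce simulation: the outer loop iterates over straight SEGMENTS,
--     # not cells.  For each heading (a (drow, dcol) vector; mirrors swap/negate its
--     # components) an inner scan locates the next mirror or X cell, and the whole
--     # straight run of coordinates is emitted at once with a range comprehension.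
--     for r, row in enumerate(board):
--         for c, cell in enumerate(row):
--             if cell in ("N", "S", "E", "O"):
--                 dr, dc = {"N": (-1, 0), "S": (1, 0),
--                           "E": (0, 1), "O": (0, -1)}[cell]
--                 path = [(r, c)]
--                 while True:
--                     k = 1
--                     while True:
--                         cell = board[r + k * dr][c + k * dc]
--                         if cell in ("\\", "/") or "X" in cell:
--                             break
--                         k += 1
--                     path += [(r + i * dr, c + i * dc) for i in range(1, k + 1)]
--                     r, c = r + k * dr, c + k * dc
--                     if "X" in cell:
--                         return path
--                     dr, dc = (dc, dr) if cell == "\\" else (-dc, -dr)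
-- ===== Notes on version B (the rewrite author's own statement) =====
-- stated objective: alternative
-- what changed: B simulates bounce-to-bounce instead of cell-by-cell: an inner scan finds the next mirror/X along the current heading and the whole straight segment of coordinates is emitted at once with a range comprehension, so the outer loop iterates over reflections only; direction is a (drow,dcol) vector reflected arithmetically, replacing A's compass-letter state, its name-to-offset dict and its list-index-trick reflection helper.
import Mathlib
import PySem

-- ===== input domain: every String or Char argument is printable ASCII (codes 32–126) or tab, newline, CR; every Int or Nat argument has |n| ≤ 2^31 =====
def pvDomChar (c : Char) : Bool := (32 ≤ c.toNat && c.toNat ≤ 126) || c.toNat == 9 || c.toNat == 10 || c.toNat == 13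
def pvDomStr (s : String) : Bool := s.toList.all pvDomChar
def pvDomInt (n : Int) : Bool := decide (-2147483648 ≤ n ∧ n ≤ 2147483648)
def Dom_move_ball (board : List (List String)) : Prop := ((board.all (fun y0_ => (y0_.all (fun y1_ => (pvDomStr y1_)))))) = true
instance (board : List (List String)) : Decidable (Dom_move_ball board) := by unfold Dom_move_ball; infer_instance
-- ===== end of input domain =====

-- B simulates bounce-to-bounce instead of cell-by-cell: an inner scan locates the next mirror/X
-- along the current (drow,dcol) heading and the whole straight segment of coordinates is emitted
-- at once with a range comprehension (objective: alternative, not faster).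

-- ===== SHARED PORT HELPERS (porting artifacts, not algorithm) =====
-- board[x][y] with Python's negative-index wraparound; none = IndexError
def cellAt (board : List (List String)) (x y : Int) : Option String :=
  match PySem.List.pyGet? board x with
  | none => none
  | some row => PySem.List.pyGet? row y
-- fuel for the while loops: strictly more than the 16·R·C bound on the states (x,y,dir) a
-- terminating run can visit (x ∈ [-R,R-1], y ∈ [-C,C-1], 4 directions); a run that exceeds it
-- repeats a state, i.e. the Python diverges (outside Pre_)
def pvFuel (board : List (List String)) : Nat :=
  16 * board.length * (board.foldl (fun m r => max m r.length) 0) + 2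

-- ===== PORT A =====
def partidaRow (x : Int) : Int → List String → Option ((Int × Int) × String)
  | _, [] => none
  | z, c :: rest =>
    if (["N", "S", "E", "O"] : List String).contains c then some ((x, z), c)
    else partidaRow x (z + 1) rest

def partidaRows : Int → List (List String) → Option ((Int × Int) × String)
  | _, [] => none
  | x, y :: rest =>
    match partidaRow x 0 y with
    | some r => some r
    | none => partidaRows (x + 1) rest

def partida (board : List (List String)) : Option ((Int × Int) × String) :=
  partidaRows 0 board

-- c[c.index(coordinate)-1] (the branch guards make index() and the -1 lookup succeed;
-- the fallback to `coordinate` in the Option matches is unreachable there)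
def ndPick (c : List String) (coordinate : String) : String :=
  match PySem.List.index? c coordinate with
  | none => coordinate
  | some i => (PySem.List.pyGet? c ((i : Int) - 1)).getD coordinate

def new_direction (coordinate : String) (objecto : String) : String :=
  if objecto = "\\" ∧ (coordinate = "E" ∨ coordinate = "S") then ndPick ["E", "S"] coordinate
  else if objecto = "\\" ∧ (coordinate = "O" ∨ coordinate = "N") then ndPick ["O", "N"] coordinate
  else if objecto = "/" ∧ (coordinate = "E" ∨ coordinate = "N") then ndPick ["E", "N"] coordinate
  else if objecto = "/" ∧ (coordinate = "O" ∨ coordinate = "S") then ndPick ["O", "S"] coordinate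
  else coordinate

def directionsA : PySem.Dict String (Int × Int) :=
  PySem.Dict.ofList [("N", (0, -1)), ("S", (0, 1)), ("E", (1, 0)), ("O", (-1, 0))]

-- the while loop; acc holds the coordinates in reverse; none-branches = Python raises there
def loopA (board : List (List String)) : Nat → Int → Int → String → List (Int × Int) → List (Int × Int)
  | 0, _, _, _, acc => acc.reverse
  | fuel + 1, x, y, rumo, acc =>
    match cellAt board x y with
    | none => acc.reverse
    | some cell =>
      if PySem.Str.isIn "X" cell then acc.reverse
      else
        match PySem.Dict.get? directionsA rumo with
        | none => acc.reverse
        | some sentido =>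
          let x' := x + sentido.2
          let y' := y + sentido.1
          let acc' := (x', y') :: acc
          match cellAt board x' y' with
          | none => acc'.reverse
          | some cell' => loopA board fuel x' y' (new_direction rumo cell') acc'

def move_ball (board : List (List String)) : List (Int × Int) :=
  match partida board with
  | none => []  -- Python: TypeError (outside Pre_)
  | some ((x, y), rumo) => loopA board (pvFuel board) x y rumo [(x, y)]

-- ===== PORT B =====
-- result of the inner scan (`while True: cell = board[r+k*dr][c+k*dc] …`):
-- found k fuel' cell = obstacle (mirror or X) at offset k, fuel' fuel units left;
-- cut k = the Python raises IndexError stepping to offset k / porting fuel ran out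
inductive ScanRes : Type
  | found : Nat → Nat → String → ScanRes
  | cut : Nat → ScanRes
deriving DecidableEq, Repr

-- the inner `while True` scan of Source B; fuel is consumed one unit per cell visited
def scanB (board : List (List String)) (r c dr dc : Int) : Nat → Nat → ScanRes
  | 0, k => .cut k
  | fuel + 1, k =>
    match cellAt board (r + ((k : Int) + 1) * dr) (c + ((k : Int) + 1) * dc) with
    | none => .cut (k + 1)
    | some cell =>
      if cell = "\\" ∨ cell = "/" ∨ PySem.Str.isIn "X" cell = true then .found (k + 1) fuel cell
      else scanB board r c dr dc fuel (k + 1)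

-- the segment comprehension `[(r+i*dr, c+i*dc) for i in range(1, k+1)]`
def seg (r c dr dc : Int) (k : Nat) : List (Int × Int) :=
  (PySem.List.pyRange 1 ((k : Int) + 1) 1).map (fun i => (r + i * dr, c + i * dc))

-- cited by loopB's decreasing_by: a successful scan consumed at least one fuel unit
theorem scanB_found_lt (board : List (List String)) (r c dr dc : Int) :
    ∀ (f k0 k f' : Nat) (cell : String),
      scanB board r c dr dc f k0 = .found k f' cell → f' < f := by
  intro f
  induction f with
  | zero => intro k0 k f' cell h; simp [scanB] at h
  | succ g ih =>
    intro k0 k f' cell h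
    rw [scanB] at h
    rcases hc : cellAt board (r + ((k0 : Int) + 1) * dr) (c + ((k0 : Int) + 1) * dc) with _ | cell2
    · rw [hc] at h; simp at h
    · rw [hc] at h; dsimp only at h
      by_cases hcond : (cell2 = "\\" ∨ cell2 = "/" ∨ PySem.Str.isIn "X" cell2 = true)
      · rw [if_pos hcond] at h; cases h; omega
      · rw [if_neg hcond] at h; exact Nat.lt_succ_of_lt (ih _ _ _ _ h)

-- the outer `while True` of Source B: one iteration per bounce; bulk-appends the segment
def loopB (board : List (List String)) : Nat → Int → Int → Int → Int → List (Int × Int) → List (Int × Int)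
  | 0, _, _, _, _, path => path
  | fuel + 1, r, c, dr, dc, path =>
    match h : scanB board r c dr dc (fuel + 1) 0 with
    | .cut k => path ++ seg r c dr dc k  -- Python: IndexError (outside Pre_)
    | .found k fuel' cell =>
      let path' := path ++ seg r c dr dc k
      if PySem.Str.isIn "X" cell then path'
      else if cell = "\\" then loopB board fuel' (r + (k : Int) * dr) (c + (k : Int) * dc) dc dr path'
      else loopB board fuel' (r + (k : Int) * dr) (c + (k : Int) * dc) (-dc) (-dr) path'
termination_by fuel _ _ _ _ _ => fuel
decreasing_by all_goals exact scanB_found_lt board r c dr dc _ 0 _ _ _ h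

-- `{"N": (-1,0), "S": (1,0), "E": (0,1), "O": (0,-1)}[cell]`
def vecOf (cell : String) : Int × Int :=
  if cell = "N" then (-1, 0) else if cell = "S" then (1, 0)
  else if cell = "E" then (0, 1) else (0, -1)

def findStartRow (x : Int) : Int → List String → Option (Int × Int × Int × Int)
  | _, [] => none
  | y, cell :: rest =>
    if (["N", "S", "E", "O"] : List String).contains cell then
      some (x, y, (vecOf cell).1, (vecOf cell).2)
    else findStartRow x (y + 1) rest

def findStart : Int → List (List String) → Option (Int × Int × Int × Int)
  | _, [] => none
  | x, row :: rest =>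
    match findStartRow x 0 row with
    | some r => some r
    | none => findStart (x + 1) rest

def move_ball_alt (board : List (List String)) : List (Int × Int) :=
  match findStart 0 board with
  | none => []  -- Python: falls off the loops, returns None (outside Pre_)
  | some (r, c, dr, dc) => loopB board (pvFuel board) r c dr dc [(r, c)]

-- ===== PRECONDITION & SPEC =====
-- independent checker used only by Pre_: does the ball, started at the start letter, reach an
-- 'X' cell (within the state-space bound, i.e. before the run provably cycles)?
def pvSimStartRow (x : Int) : Int → List String → Option (Int × Int × Int × Int)
  | _, [] => none
  | y, cell :: rest =>
    if cell = "N" then some (x, y, -1, 0)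
    else if cell = "S" then some (x, y, 1, 0)
    else if cell = "E" then some (x, y, 0, 1)
    else if cell = "O" then some (x, y, 0, -1)
    else pvSimStartRow x (y + 1) rest

def pvSimStart : Int → List (List String) → Option (Int × Int × Int × Int)
  | _, [] => none
  | x, row :: rest =>
    match pvSimStartRow x 0 row with
    | some r => some r
    | none => pvSimStart (x + 1) rest

def pvSimLoop (board : List (List String)) : Nat → Int → Int → Int → Int → Bool
  | 0, _, _, _, _ => false
  | fuel + 1, r, c, dr, dc =>
    match cellAt board r c with
    | none => false
    | some cell =>
      if PySem.Str.isIn "X" cell then true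
      else
        match cellAt board (r + dr) (c + dc) with
        | none => false
        | some cell' =>
          if cell' = "\\" then pvSimLoop board fuel (r + dr) (c + dc) dc dr
          else if cell' = "/" then pvSimLoop board fuel (r + dr) (c + dc) (-dc) (-dr)
          else pvSimLoop board fuel (r + dr) (c + dc) dr dc

-- Pre_: exactly the boards on which Python A returns normally — a start letter exists and the
-- ball's path stays on the (wraparound-indexed) board and reaches a cell containing 'X'
-- (otherwise A raises TypeError / IndexError or loops forever). Termination of this simulation
-- has no simpler closed form; the bound makes 'the run reaches an X cell' decidable, and the
-- equivalence proof below does not use Pre_ at all (the ports agree on every input).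
def Pre_move_ball (board : List (List String)) : Prop :=
  (match pvSimStart 0 board with
   | none => false
   | some (r, c, dr, dc) => pvSimLoop board (pvFuel board) r c dr dc) = true
instance (board : List (List String)) : Decidable (Pre_move_ball board) := by
  unfold Pre_move_ball; infer_instance

def pvWitness_move_ball : List (List String) :=
  [[".", "/", "X"], ["E", "\\", "."], [".", "X", "."]]

def Spec_move_ball (board : List (List String)) (out : List (Int × Int)) : Prop := out = move_ball_alt board
instance (board : List (List String)) (out : List (Int × Int)) : Decidable (Spec_move_ball board out) := by unfold Spec_move_ball; infer_instance

-- ===== CLAIM (what is proved, stated in full; the proofs are below) =====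
def Claim_equal_move_ball : Prop := ∀ (board : List (List String)), Dom_move_ball board → Pre_move_ball board → Spec_move_ball board (move_ball board)

-- ===== LEMMAS AND PROOFS =====

-- the letter ↔ velocity-vector correspondence
def LRel (rumo : String) (dr dc : Int) : Prop :=
  (rumo = "N" ∧ dr = -1 ∧ dc = 0) ∨ (rumo = "S" ∧ dr = 1 ∧ dc = 0) ∨
  (rumo = "E" ∧ dr = 0 ∧ dc = 1) ∨ (rumo = "O" ∧ dr = 0 ∧ dc = -1)

theorem seg_zero (r c dr dc : Int) : seg r c dr dc 0 = [] := by
  unfold seg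
  rw [show ((0 : Nat) : Int) + 1 = 1 by norm_num, PySem.List.pyRange_one_eq_nil le_rfl]
  rfl

theorem seg_succ (r c dr dc : Int) (k : Nat) :
    seg r c dr dc (k + 1)
      = seg r c dr dc k ++ [(r + ((k : Int) + 1) * dr, c + ((k : Int) + 1) * dc)] := by
  unfold seg
  rw [show ((k + 1 : Nat) : Int) + 1 = (((k : Int) + 1)) + 1 by push_cast; ring,
      PySem.List.pyRange_one_succ_right (by omega : (1 : Int) ≤ (k : Int) + 1)]
  simp

-- A stops immediately (returning the reversed accumulator) at a cell containing "X"
theorem loopA_stop (board : List (List String)) (x y : Int) (cell : String)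
    (hc : cellAt board x y = some cell) (hX : PySem.Str.isIn "X" cell = true) :
    ∀ (f : Nat) (rumo : String) (acc : List (Int × Int)),
      loopA board f x y rumo acc = acc.reverse := by
  intro f rumo acc
  cases f with
  | zero => rfl
  | succ g => rw [loopA, hc]; simp only [hX, if_true]

theorem new_direction_plain (coordinate objecto : String)
    (hb : objecto ≠ "\\") (hs : objecto ≠ "/") :
    new_direction coordinate objecto = coordinate := by
  unfold new_direction
  rw [if_neg (by tauto), if_neg (by tauto), if_neg (by tauto), if_neg (by tauto)]

-- one step of A at an in-range, non-X cell, with the direction letter abstracted to its vector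
theorem loopA_step (board : List (List String)) (x y dr dc : Int) (rumo cur : String)
    (g : Nat) (acc : List (Int × Int))
    (hrel : LRel rumo dr dc) (hcell : cellAt board x y = some cur)
    (hX : PySem.Str.isIn "X" cur = false) :
    loopA board (g + 1) x y rumo acc
      = (match cellAt board (x + dr) (y + dc) with
         | none => ((x + dr, y + dc) :: acc).reverse
         | some cell' => loopA board g (x + dr) (y + dc) (new_direction rumo cell') ((x + dr, y + dc) :: acc)) := by
  rcases hrel with ⟨h1, h2, h3⟩ | ⟨h1, h2, h3⟩ | ⟨h1, h2, h3⟩ | ⟨h1, h2, h3⟩ <;>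
    subst h1 <;> subst h2 <;> subst h3 <;>
    · rw [loopA, hcell]
      simp only [hX, Bool.false_eq_true, if_false]
      rfl

-- the continuation of loopB after its inner scan returned
def scanCont (board : List (List String)) (r c dr dc : Int) (acc0 : List (Int × Int)) :
    ScanRes → List (Int × Int)
  | .cut k' => acc0.reverse ++ seg r c dr dc k'
  | .found k' f' cell =>
    if PySem.Str.isIn "X" cell then acc0.reverse ++ seg r c dr dc k'
    else if cell = "\\" then
      loopB board f' (r + (k' : Int) * dr) (c + (k' : Int) * dc) dc dr (acc0.reverse ++ seg r c dr dc k')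
    else
      loopB board f' (r + (k' : Int) * dr) (c + (k' : Int) * dc) (-dc) (-dr) (acc0.reverse ++ seg r c dr dc k')

theorem loopB_eq_scanCont (board : List (List String)) (r c dr dc : Int)
    (g : Nat) (acc : List (Int × Int)) :
    loopB board (g + 1) r c dr dc acc.reverse
      = scanCont board r c dr dc acc (scanB board r c dr dc (g + 1) 0) := by
  rw [loopB]
  rcases hs : scanB board r c dr dc (g + 1) 0 with ⟨k', f', cell⟩ | k' <;>
    simp only [scanCont]

-- how a mirror transforms the letter vs. the vector
theorem LRel_back (rumo : String) (dr dc : Int) (h : LRel rumo dr dc) :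
    LRel (new_direction rumo "\\") dc dr := by
  rcases h with ⟨h1, h2, h3⟩ | ⟨h1, h2, h3⟩ | ⟨h1, h2, h3⟩ | ⟨h1, h2, h3⟩ <;>
    subst h1 <;> subst h2 <;> subst h3 <;>
    simp only [show new_direction "N" "\\" = "O" from by decide,
      show new_direction "S" "\\" = "E" from by decide,
      show new_direction "E" "\\" = "S" from by decide,
      show new_direction "O" "\\" = "N" from by decide] <;> norm_num [LRel]

theorem LRel_slash (rumo : String) (dr dc : Int) (h : LRel rumo dr dc) :
    LRel (new_direction rumo "/") (-dc) (-dr) := by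
  rcases h with ⟨h1, h2, h3⟩ | ⟨h1, h2, h3⟩ | ⟨h1, h2, h3⟩ | ⟨h1, h2, h3⟩ <;>
    subst h1 <;> subst h2 <;> subst h3 <;>
    simp only [show new_direction "N" "/" = "E" from by decide,
      show new_direction "S" "/" = "O" from by decide,
      show new_direction "E" "/" = "N" from by decide,
      show new_direction "O" "/" = "S" from by decide] <;> norm_num [LRel]

-- mid-segment invariant: A, standing at offset k of the current segment with the segment's
-- coordinates already accumulated, computes exactly what loopB's continuation computes from
-- the scan's outcome
theorem aux_scan (board : List (List String)) (r c dr dc : Int) (F : Nat)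
    (IH : ∀ (f' : Nat), f' < F → ∀ (r' c' dr' dc' : Int) (rumo : String)
        (acc : List (Int × Int)) (cur : String),
        LRel rumo dr' dc' → cellAt board r' c' = some cur →
        PySem.Str.isIn "X" cur = false →
        loopA board f' r' c' rumo acc = loopB board f' r' c' dr' dc' acc.reverse) :
    ∀ (f : Nat), f ≤ F → ∀ (k : Nat) (rumo : String) (acc0 : List (Int × Int)) (cur : String),
      LRel rumo dr dc →
      cellAt board (r + (k : Int) * dr) (c + (k : Int) * dc) = some cur →
      PySem.Str.isIn "X" cur = false →
      loopA board f (r + (k : Int) * dr) (c + (k : Int) * dc) rumo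
          ((seg r c dr dc k).reverse ++ acc0)
        = scanCont board r c dr dc acc0 (scanB board r c dr dc f k) := by
  intro f
  induction f with
  | zero =>
    intro _ k rumo acc0 cur hrel hcell hX
    simp [loopA, scanB, scanCont]
  | succ g ihf =>
    intro hF k rumo acc0 cur hrel hcell hX
    have hstep := loopA_step board (r + (k : Int) * dr) (c + (k : Int) * dc) dr dc rumo cur g
      ((seg r c dr dc k).reverse ++ acc0) hrel hcell hX
    have ex : r + (k : Int) * dr + dr = r + ((k : Int) + 1) * dr := by ring
    have ey : c + (k : Int) * dc + dc = c + ((k : Int) + 1) * dc := by ring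
    rw [ex, ey] at hstep
    rw [hstep, scanB]
    rcases hc2 : cellAt board (r + ((k : Int) + 1) * dr) (c + ((k : Int) + 1) * dc) with _ | cell2
    · -- IndexError while stepping: A returns the partial path, the scan reports .cut (k+1)
      dsimp only
      simp [scanCont, seg_succ]
    · dsimp only
      by_cases hcond : (cell2 = "\\" ∨ cell2 = "/" ∨ PySem.Str.isIn "X" cell2 = true)
      · rw [if_pos hcond]
        by_cases hb : cell2 = "\\"
        · subst hb
          have hxb : PySem.Str.isIn "X" "\\" = false := by decide
          rw [IH g (by omega) _ _ dc dr _ _ "\\" (LRel_back _ _ _ hrel) hc2 hxb]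
          simp [scanCont, show PySem.Chars.isIn ['X'] ['\\'] = false from by decide,
                seg_succ, Nat.cast_add, Nat.cast_one]
        · by_cases hs : cell2 = "/"
          · subst hs
            have hxs : PySem.Str.isIn "X" "/" = false := by decide
            rw [IH g (by omega) _ _ (-dc) (-dr) _ _ "/" (LRel_slash _ _ _ hrel) hc2 hxs]
            simp [scanCont, show PySem.Chars.isIn ['X'] ['/'] = false from by decide,
                  seg_succ, Nat.cast_add, Nat.cast_one]
          · have hX2 : PySem.Str.isIn "X" cell2 = true := by tauto
            rw [loopA_stop board _ _ cell2 hc2 hX2 g _ _]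
            simp only [scanCont]
            rw [if_pos hX2]
            simp [seg_succ]
      · rw [if_neg hcond]
        have hb : cell2 ≠ "\\" := fun h => hcond (Or.inl h)
        have hs : cell2 ≠ "/" := fun h => hcond (Or.inr (Or.inl h))
        have hX2 : PySem.Str.isIn "X" cell2 = false := by
          rcases Bool.eq_false_or_eq_true (PySem.Str.isIn "X" cell2) with h | h
          · exact absurd (Or.inr (Or.inr h)) hcond
          · exact h
        rw [new_direction_plain rumo cell2 hb hs]
        have hacc : ((r + ((k : Int) + 1) * dr, c + ((k : Int) + 1) * dc)
              :: ((seg r c dr dc k).reverse ++ acc0))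
            = (seg r c dr dc (k + 1)).reverse ++ acc0 := by
          simp [seg_succ]
        rw [hacc]
        have h := ihf (by omega) (k + 1) rumo acc0 cell2 hrel
          (by push_cast; exact hc2) hX2
        push_cast at h
        exact h

theorem loop_eq (board : List (List String)) :
    ∀ (F : Nat) (r c dr dc : Int) (rumo : String) (acc : List (Int × Int)) (cur : String),
      LRel rumo dr dc → cellAt board r c = some cur → PySem.Str.isIn "X" cur = false →
      loopA board F r c rumo acc = loopB board F r c dr dc acc.reverse := by
  intro F
  induction F using Nat.strong_induction_on with
  | _ F IH =>
    intro r c dr dc rumo acc cur hrel hcell hX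
    rcases F with _ | g
    · simp [loopA, loopB]
    · rw [loopB_eq_scanCont]
      have hcell0 : cellAt board (r + ((0 : Nat) : Int) * dr) (c + ((0 : Nat) : Int) * dc) = some cur := by
        simpa using hcell
      have h := aux_scan board r c dr dc (g + 1) IH (g + 1) le_rfl 0 rumo acc cur hrel hcell0 hX
      simpa [seg_zero] using h

-- ===== start search: A's partida and B's findStart find the same cell, letter ↔ vector =====
theorem row_start (x : Int) :
    ∀ (row : List String) (z : Nat),
      (partidaRow x (z : Int) row = none ∧ findStartRow x (z : Int) row = none) ∨
      (∃ (j : Nat) (rumo : String) (dr dc : Int),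
        partidaRow x (z : Int) row = some ((x, ((z + j : Nat) : Int)), rumo) ∧
        findStartRow x (z : Int) row = some (x, ((z + j : Nat) : Int), dr, dc) ∧
        LRel rumo dr dc ∧ row[j]? = some rumo ∧ PySem.Str.isIn "X" rumo = false) := by
  intro row
  induction row with
  | nil => intro z; left; exact ⟨rfl, rfl⟩
  | cons cc rest ih =>
    intro z
    by_cases hN : cc = "N"
    · subst hN; right
      exact ⟨0, "N", -1, 0, by simp [partidaRow], by simp [findStartRow, vecOf],
        Or.inl ⟨rfl, rfl, rfl⟩, by simp, by decide⟩
    · by_cases hS : cc = "S"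
      · subst hS; right
        exact ⟨0, "S", 1, 0, by simp [partidaRow], by simp [findStartRow, vecOf],
          Or.inr (Or.inl ⟨rfl, rfl, rfl⟩), by simp, by decide⟩
      · by_cases hE : cc = "E"
        · subst hE; right
          exact ⟨0, "E", 0, 1, by simp [partidaRow], by simp [findStartRow, vecOf],
            Or.inr (Or.inr (Or.inl ⟨rfl, rfl, rfl⟩)), by simp, by decide⟩
        · by_cases hO : cc = "O"
          · subst hO; right
            exact ⟨0, "O", 0, -1, by simp [partidaRow], by simp [findStartRow, vecOf, hN, hS, hE],
              Or.inr (Or.inr (Or.inr ⟨rfl, rfl, rfl⟩)), by simp, by decide⟩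
          · have hcont : (["N", "S", "E", "O"] : List String).contains cc = false := by
              simp [hN, hS, hE, hO]
            have hz : ((z : Int) + 1) = ((z + 1 : Nat) : Int) := by push_cast; ring
            rcases ih (z + 1) with ⟨hA, hB⟩ | ⟨j, rumo, dr, dc, hA, hB, hrel, hj, hXr⟩
            · left
              constructor
              · rw [partidaRow, if_neg (by simp [hN, hS, hE, hO]), hz]; exact hA
              · rw [findStartRow, if_neg (by simp [hN, hS, hE, hO]), hz]; exact hB
            · right
              refine ⟨j + 1, rumo, dr, dc, ?_, ?_, hrel, by simpa using hj, hXr⟩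
              · rw [partidaRow, if_neg (by simp [hN, hS, hE, hO]), hz, hA]
                norm_num; omega
              · rw [findStartRow, if_neg (by simp [hN, hS, hE, hO]), hz, hB]
                norm_num; omega

theorem rows_start :
    ∀ (rows : List (List String)) (x : Nat),
      (partidaRows (x : Int) rows = none ∧ findStart (x : Int) rows = none) ∨
      (∃ (i j : Nat) (rumo : String) (dr dc : Int) (row : List String),
        partidaRows (x : Int) rows = some ((((x + i : Nat) : Int), (j : Int)), rumo) ∧
        findStart (x : Int) rows = some (((x + i : Nat) : Int), (j : Int), dr, dc) ∧
        LRel rumo dr dc ∧ rows[i]? = some row ∧ row[j]? = some rumo ∧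
        PySem.Str.isIn "X" rumo = false) := by
  intro rows
  induction rows with
  | nil => intro x; left; exact ⟨rfl, rfl⟩
  | cons row rest ih =>
    intro x
    rcases row_start (x : Int) row 0 with ⟨hA, hB⟩ | ⟨j, rumo, dr, dc, hA, hB, hrel, hj, hXr⟩ <;>
      simp only [Nat.cast_zero, Nat.zero_add] at hA hB
    · have hx : ((x : Int) + 1) = ((x + 1 : Nat) : Int) := by push_cast; ring
      rcases ih (x + 1) with ⟨hA', hB'⟩ | ⟨i, j, rumo, dr, dc, row', hA', hB', hrel, hi, hj, hXr⟩
      · left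
        constructor
        · rw [partidaRows, hA, hx]; exact hA'
        · rw [findStart, hB, hx]; exact hB'
      · right
        refine ⟨i + 1, j, rumo, dr, dc, row', ?_, ?_, hrel, by simpa using hi, hj, hXr⟩
        · rw [partidaRows, hA, hx, hA']
          norm_num; omega
        · rw [findStart, hB, hx, hB']
          norm_num; omega
    · right
      exact ⟨0, j, rumo, dr, dc, row, by rw [partidaRows, hA]; simp, by rw [findStart, hB]; simp,
        hrel, by simp, hj, hXr⟩

-- ===== VERDICT (by name: the statement is the Claim_ definition above) =====
theorem move_ball_spec : Claim_equal_move_ball := by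
  intro board _ _
  unfold Spec_move_ball move_ball move_ball_alt
  rcases rows_start board 0 with ⟨hA, hB⟩ | ⟨i, j, rumo, dr, dc, row, hA, hB, hrel, hrow, hcol, hX⟩ <;>
    simp only [Nat.cast_zero, Nat.zero_add] at *
  · rw [show partida board = partidaRows 0 board from rfl, hA, hB]
  · rw [show partida board = partidaRows 0 board from rfl, hA, hB]
    have hcell : cellAt board (i : Int) (j : Int) = some rumo := by
      unfold cellAt
      rw [PySem.List.pyGet?_natCast, hrow]
      simpa using hcol
    have h := loop_eq board (pvFuel board) (i : Int) (j : Int) dr dc rumo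
      [((i : Int), (j : Int))] rumo hrel hcell hX
    simpa using h
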